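-- pv_equiv track=rewrite | github.com/alyfilhos/Resolucao-do-Bin-Packing-1D-com-GRASP-e-Simulated-Annealing | Códigos/GRASP.py | BImprovement
-- ===== SOURCE A (Python) =====
-- def BImprovement(Solution, capacidade):
--     #Aqui eu busco todas as melhorias possíveis
--     BestSolution = Solution
--     BinsSolution = len(Solution)
--     for i in range(len(Solution)):
--         for j in range(i + 1, len(Solution)):
--             Box1 = Solution[i]
--             Box2 = Solution[j]
--             SumBox2 = sum(Box2)
--             for item in Box1:
--                 if SumBox2 + item <= capacidade:
--                     NewSolution = [bin[:] for bin in Solution]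
--                     NewSolution[i].remove(item)
--                     NewSolution[j].append(item)
--                     SumBox2+= item
--                     if not NewSolution[i]:
--                         del NewSolution[i]
--                     QtdBins = len(NewSolution)
--                     if QtdBins < BinsSolution:
--                         BestSolution = NewSolution
--                         BinsSolution = QtdBins
--     if BestSolution != Solution:
--         return BestSolution
--     return None
-- ===== SOURCE B (Python) =====
-- def BImprovement(Solution, capacidade):
--     # Only emptying a singleton bin can reduce the bin count, and A keeps the
--     # first such move (i ascending, then target j > i ascending); find it
--     # directly using precomputed bin sums.
--     sums = [sum(b) for b in Solution]
--     n = len(Solution)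
--     for i in range(n):
--         if len(Solution[i]) == 1:
--             x = Solution[i][0]
--             for j in range(i + 1, n):
--                 if sums[j] + x <= capacidade:
--                     new = list(Solution)
--                     new[j] = new[j] + [x]
--                     del new[i]
--                     return new
--     return None
-- ===== Notes on version B (the rewrite author's own statement) =====
-- stated objective: faster
-- what changed: A tries every item move over full deep copies of the solution and keeps the best; B exploits that only moving the item of a singleton bin into a later bin can reduce the bin count (the only accepted improvement), so it scans once with precomputed bin sums and returns the first such move directly.
import Mathlib
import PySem

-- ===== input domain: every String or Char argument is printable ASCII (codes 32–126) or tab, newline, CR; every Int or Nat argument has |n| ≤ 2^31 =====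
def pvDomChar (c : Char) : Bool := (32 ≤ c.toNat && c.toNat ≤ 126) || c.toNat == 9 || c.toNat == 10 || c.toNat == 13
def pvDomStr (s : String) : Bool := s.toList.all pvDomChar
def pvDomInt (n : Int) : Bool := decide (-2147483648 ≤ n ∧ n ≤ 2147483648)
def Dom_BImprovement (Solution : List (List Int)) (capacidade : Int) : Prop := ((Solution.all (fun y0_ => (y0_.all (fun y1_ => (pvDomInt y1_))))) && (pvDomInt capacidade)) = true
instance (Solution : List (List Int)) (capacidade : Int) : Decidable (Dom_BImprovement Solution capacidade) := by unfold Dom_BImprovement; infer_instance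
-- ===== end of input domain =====

-- B replaces A's triple loop over copied solutions by a direct scan: only moving
-- the item of a singleton bin into a later bin can reduce the bin count, so B
-- finds the first such (i, j) using precomputed bin sums (objective: faster).

-- ===== PORT A =====
-- innermost loop body ('for item in Box1'); state = (SumBox2, (BestSolution, BinsSolution))
def pvAitem (Solution : List (List Int)) (capacidade : Int) (i j : Int)
    (s : Int × List (List Int) × Int) (item : Int) : Int × List (List Int) × Int :=
  if s.1 + item ≤ capacidade then
    let NewSolution := Solution.map (fun bin => bin)            -- [bin[:] for bin in Solution]
    -- NewSolution[i].remove(item): item ∈ NewSolution[i] always here, so remove? is some and the default is unreachable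
    let NewSolution := PySem.List.pySetD NewSolution i ((PySem.List.remove? (PySem.List.pyGetD NewSolution i []) item).getD [])
    let NewSolution := PySem.List.pySetD NewSolution j (PySem.List.pyGetD NewSolution j [] ++ [item])
    -- SumBox2 += item happens in both sub-branches below (s.1 + item)
    let NewSolution := if PySem.List.pyGetD NewSolution i [] = [] then NewSolution.eraseIdx i.toNat else NewSolution -- del NewSolution[i]; i ≥ 0 here
    let QtdBins : Int := NewSolution.length
    if QtdBins < s.2.2 then (s.1 + item, NewSolution, QtdBins) else (s.1 + item, s.2)
  else s

-- body of 'for j in range(i + 1, len(Solution))'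
def pvAj (Solution : List (List Int)) (capacidade : Int) (i : Int)
    (st : List (List Int) × Int) (j : Int) : List (List Int) × Int :=
  let Box1 := PySem.List.pyGetD Solution i []
  let Box2 := PySem.List.pyGetD Solution j []
  let SumBox2 := Box2.sum
  (Box1.foldl (pvAitem Solution capacidade i j) (SumBox2, st)).2

-- body of 'for i in range(len(Solution))'
def pvAi (Solution : List (List Int)) (capacidade : Int)
    (st : List (List Int) × Int) (i : Int) : List (List Int) × Int :=
  (PySem.List.pyRange (i + 1) (Solution.length : Int) 1).foldl (pvAj Solution capacidade i) st

def BImprovement (Solution : List (List Int)) (capacidade : Int) : Option (List (List Int)) :=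
  let st := (PySem.List.pyRange 0 (Solution.length : Int) 1).foldl (pvAi Solution capacidade)
              (Solution, (Solution.length : Int))
  if st.1 ≠ Solution then some st.1 else none

-- ===== PORT B =====
def BImprovement_alt (Solution : List (List Int)) (capacidade : Int) : Option (List (List Int)) :=
  let sums := Solution.map List.sum
  let n := Solution.length
  (List.range n).findSome? (fun i =>
    if (Solution.getD i []).length = 1 then
      let x := (Solution.getD i []).getD 0 0                    -- Solution[i][0]; in range by the guard
      (List.range' (i + 1) (n - (i + 1))).findSome? (fun j =>
        if sums.getD j 0 + x ≤ capacidade then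
          some ((Solution.set j (Solution.getD j [] ++ [x])).eraseIdx i)
        else none)
    else none)

-- ===== PRECONDITION & SPEC =====
def Spec_BImprovement (Solution : List (List Int)) (capacidade : Int) (out : Option (List (List Int))) : Prop := out = BImprovement_alt Solution capacidade
instance (Solution : List (List Int)) (capacidade : Int) (out : Option (List (List Int))) : Decidable (Spec_BImprovement Solution capacidade out) := by unfold Spec_BImprovement; infer_instance

-- ===== CLAIM (what is proved, stated in full; the proofs are below) =====
def Claim_equal_BImprovement : Prop := ∀ (Solution : List (List Int)) (capacidade : Int), Dom_BImprovement Solution capacidade → Spec_BImprovement Solution capacidade (BImprovement Solution capacidade)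

-- ===== LEMMAS AND PROOFS =====

-- the per-i search B performs (B's body with its lets substituted)
def pvFind (S : List (List Int)) (cap : Int) (i : Nat) : Option (List (List Int)) :=
  if (S.getD i []).length = 1 then
    (List.range' (i + 1) (S.length - (i + 1))).findSome? (fun j =>
      if (S.map List.sum).getD j 0 + (S.getD i []).getD 0 0 ≤ cap then
        some ((S.set j (S.getD j [] ++ [(S.getD i []).getD 0 0])).eraseIdx i)
      else none)
  else none

theorem pvBalt_eq (S : List (List Int)) (cap : Int) :
    BImprovement_alt S cap = (List.range S.length).findSome? (pvFind S cap) := rfl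

-- a foldl whose step fixes c stays at c
theorem pvFoldl_fixed {α β : Type} (f : β → α → β) (c : β) (L : List α)
    (h : ∀ x, f c x = c) : L.foldl f c = c := by
  induction L with
  | nil => rfl
  | cons x L ih => simp [List.foldl, h x, ih]

theorem pvSet_eraseIdx_self (l : List (List Int)) (i : Nat) (v : List Int) :
    (l.set i v).eraseIdx i = l.eraseIdx i := by
  induction l generalizing i with
  | nil => simp
  | cons a l ih =>
    cases i with
    | zero => simp
    | succ i => simp [ih]


theorem pvAitem_snd_le (S : List (List Int)) (cap i j : Int)
    (s : Int × List (List Int) × Int) (a : Int)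
    (h : s.2.2 ≤ (S.length : Int) - 1) : (pvAitem S cap i j s a).2 = s.2 := by
  unfold pvAitem
  split
  · dsimp only
    split
    · split
      · rename_i hlt
        exfalso
        simp only [List.length_eraseIdx, PySem.List.length_pySetD, List.length_map] at hlt
        split at hlt <;> omega
      · rfl
    · split
      · rename_i hlt
        exfalso
        simp only [PySem.List.length_pySetD, List.length_map] at hlt
        omega
      · rfl
  · rfl

theorem pvA1 (S : List (List Int)) (cap : Int) (i j : Int) (L : List Int) :
    ∀ (sum : Int) (b : List (List Int)),
      (L.foldl (pvAitem S cap i j) (sum, (b, (S.length : Int) - 1))).2 = (b, (S.length : Int) - 1) := by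
  induction L with
  | nil => intro sum b; rfl
  | cons a L ih =>
    intro sum b
    rw [List.foldl_cons]
    have h := pvAitem_snd_le S cap i j (sum, (b, (S.length : Int) - 1)) a (by simp)
    rcases hh : pvAitem S cap i j (sum, (b, (S.length : Int) - 1)) a with ⟨s1, s2⟩
    rw [hh] at h
    simp only at h
    rw [h]
    exact ih s1 b

theorem pvAj_fixed (S : List (List Int)) (cap : Int) (i : Int) (b : List (List Int)) (j : Int) :
    pvAj S cap i (b, (S.length : Int) - 1) j = (b, (S.length : Int) - 1) := by
  unfold pvAj
  exact pvA1 S cap i j _ _ b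

theorem pvAi_fixed (S : List (List Int)) (cap : Int) (b : List (List Int)) (i : Int) :
    pvAi S cap (b, (S.length : Int) - 1) i = (b, (S.length : Int) - 1) := by
  unfold pvAi
  exact pvFoldl_fixed _ _ _ (fun j => pvAj_fixed S cap i b j)

theorem pvGetD_set_self (l : List (List Int)) (i : Nat) (v d : List Int) (hi : i < l.length) :
    (l.set i v).getD i d = v := by
  simp [List.getD_eq_getElem?_getD, List.getElem?_set_self hi]

theorem pvGetD_set_ne (l : List (List Int)) (i j : Nat) (v d : List Int) (hij : i ≠ j) :
    (l.set i v).getD j d = l.getD j d := by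
  simp [List.getD_eq_getElem?_getD, List.getElem?_set_ne hij]

theorem pvA2 (S : List (List Int)) (cap : Int) (i j : Nat)
    (hi : i < S.length) (_hj : j < S.length) (hij : i ≠ j)
    (hlen : (S.getD i []).length ≠ 1) :
    ∀ (L : List Int), (∀ x ∈ L, x ∈ S.getD i []) → ∀ (sum : Int),
      (L.foldl (pvAitem S cap (i : Int) (j : Int)) (sum, (S, (S.length : Int)))).2
        = (S, (S.length : Int)) := by
  intro L
  induction L with
  | nil => intro _ sum; rfl
  | cons a L ih =>
    intro hmem sum
    have ha : a ∈ S.getD i [] := hmem a (by simp)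
    have hrm : PySem.List.remove? (S.getD i []) a = some ((S.getD i []).erase a) :=
      PySem.List.remove?_eq_some_erase _ a ha
    have hElen : ((S.getD i []).erase a).length = (S.getD i []).length - 1 :=
      List.length_erase_of_mem ha
    have hpos : 0 < (S.getD i []).length := List.length_pos_of_mem ha
    have hne : (S.getD i []).erase a ≠ [] := by
      intro hE
      have h0 := hElen
      rw [hE] at h0
      simp only [List.length_nil] at h0
      omega
    rw [List.foldl_cons]
    have hstep : pvAitem S cap (i : Int) (j : Int) (sum, (S, (S.length : Int))) a
        = (if sum + a ≤ cap then sum + a else sum, (S, (S.length : Int))) := by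
      unfold pvAitem
      dsimp only
      split
      · rename_i hcond
        simp only [List.map_id', PySem.List.pyGetD_natCast, PySem.List.pySetD_natCast, hrm,
          Option.getD_some]
        rw [pvGetD_set_ne _ j i _ _ (Ne.symm hij), pvGetD_set_self _ i _ _ hi, if_neg hne]
        simp only [List.length_set]
        rw [if_neg (lt_irrefl ((S.length : Int)))]
      · rfl
    rw [hstep]
    exact ih (fun x hx => hmem x (List.mem_cons_of_mem _ hx)) _

theorem pvA3hit (S : List (List Int)) (cap : Int) (i j : Nat) (x : Int)
    (hi : i < S.length) (hj : j < S.length) (hij : i ≠ j)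
    (hsing : S.getD i [] = [x]) (hc : (S.getD j []).sum + x ≤ cap) :
    (([x]).foldl (pvAitem S cap (i : Int) (j : Int)) ((S.getD j []).sum, (S, (S.length : Int)))).2
      = ((S.set j (S.getD j [] ++ [x])).eraseIdx i, (S.length : Int) - 1) := by
  rw [List.foldl_cons, List.foldl_nil]
  unfold pvAitem
  dsimp only
  rw [if_pos hc]
  simp only [List.map_id', PySem.List.pyGetD_natCast, PySem.List.pySetD_natCast, hsing,
    PySem.List.remove?_cons_self, Option.getD_some]
  rw [pvGetD_set_ne _ i j _ _ hij, pvGetD_set_ne _ j i _ _ (Ne.symm hij),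
    pvGetD_set_self _ i _ _ hi, if_pos rfl]
  simp only [Int.toNat_natCast, List.length_eraseIdx, List.length_set]
  rw [if_pos hi, if_pos (by omega : ((S.length - 1 : Nat) : Int) < (S.length : Int))]
  rw [List.set_comm _ _ hij, pvSet_eraseIdx_self]
  simp only
  congr 1
  omega

theorem pvA3miss (S : List (List Int)) (cap : Int) (i j : Nat) (x : Int)
    (hc : ¬ (S.getD j []).sum + x ≤ cap) :
    (([x]).foldl (pvAitem S cap (i : Int) (j : Int)) ((S.getD j []).sum, (S, (S.length : Int)))).2
      = (S, (S.length : Int)) := by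
  rw [List.foldl_cons, List.foldl_nil]
  unfold pvAitem
  dsimp only
  rw [if_neg hc]

-- the j-loop from the unimproved state, as a Nat-indexed fold
theorem pvAj_eq (S : List (List Int)) (cap : Int) (i j : Nat) (st : List (List Int) × Int) :
    pvAj S cap (i : Int) st ((j : Nat) : Int)
      = ((S.getD i []).foldl (pvAitem S cap (i : Int) (j : Int)) ((S.getD j []).sum, st)).2 := by
  unfold pvAj
  rw [PySem.List.pyGetD_natCast, PySem.List.pyGetD_natCast]

theorem pvA4 (S : List (List Int)) (cap : Int) (i : Nat) (hi : i < S.length) :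
    ∀ (J : List Nat), (∀ j ∈ J, i < j ∧ j < S.length) →
      (J.foldl (fun (st : List (List Int) × Int) (j : Nat) => pvAj S cap (i : Int) st (j : Int)) (S, (S.length : Int)))
        = (match (if (S.getD i []).length = 1 then
              J.findSome? (fun j =>
                if (S.map List.sum).getD j 0 + (S.getD i []).getD 0 0 ≤ cap then
                   some ((S.set j (S.getD j [] ++ [(S.getD i []).getD 0 0])).eraseIdx i)
                 else none)
              else none) with
           | some b => (b, (S.length : Int) - 1)
           | none => (S, (S.length : Int))) := by
  intro J
  induction J with
  | nil =>
    intro _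
    by_cases hlen : (S.getD i []).length = 1
    · rw [if_pos hlen]; rfl
    · rw [if_neg hlen]; rfl
  | cons j J ih =>
    intro hJ
    obtain ⟨hij, hjn⟩ := hJ j (by simp)
    have hij' : i ≠ j := Nat.ne_of_lt hij
    have hrest : ∀ j' ∈ J, i < j' ∧ j' < S.length :=
      fun j' hj' => hJ j' (List.mem_cons_of_mem _ hj')
    have hsum : (S.map List.sum).getD j 0 = (S.getD j []).sum := by
      simp [List.getD_eq_getElem?_getD, List.getElem?_map, List.getElem?_eq_getElem hjn]
    rw [List.foldl_cons]
    by_cases hlen : (S.getD i []).length = 1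
    · rcases hGi : S.getD i [] with _ | ⟨x, t⟩
      · rw [hGi] at hlen; simp at hlen
      · rcases t with _ | ⟨y, t⟩
        · -- S.getD i [] = [x]
          have hx0 : (S.getD i []).getD 0 0 = x := by rw [hGi]; rfl
          by_cases hc : (S.getD j []).sum + x ≤ cap
          · -- first hit at j
            have hstep : pvAj S cap (i : Int) (S, (S.length : Int)) ((j : Nat) : Int)
                = ((S.set j (S.getD j [] ++ [x])).eraseIdx i, (S.length : Int) - 1) := by
              rw [pvAj_eq, hGi]
              exact pvA3hit S cap i j x hi hjn hij' hGi hc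
            rw [hstep,
              pvFoldl_fixed _ _ J (fun j' => pvAj_fixed S cap (i : Int) _ ((j' : Nat) : Int))]
            have hgd : S.getD j [] = S[j] := by
              rw [List.getD_eq_getElem?_getD, List.getElem?_eq_getElem hjn]; rfl
            rw [hgd] at hc
            simp [hc, List.getElem?_eq_getElem hjn]
          · -- this j does not fit: state unchanged
            have hstep : pvAj S cap (i : Int) (S, (S.length : Int)) ((j : Nat) : Int)
                = (S, (S.length : Int)) := by
              rw [pvAj_eq, hGi]
              exact pvA3miss S cap i j x hc
            have ih' := ih hrest
            rw [hGi] at ih'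
            rw [hstep, ih']
            have hgd : S.getD j [] = S[j] := by
              rw [List.getD_eq_getElem?_getD, List.getElem?_eq_getElem hjn]; rfl
            rw [hgd] at hc
            simp [hc, List.getElem?_eq_getElem hjn]
        · rw [hGi] at hlen; simp at hlen
    · -- non-singleton: this j leaves the state unchanged
      have hstate : pvAj S cap (i : Int) (S, (S.length : Int)) ((j : Nat) : Int)
          = (S, (S.length : Int)) := by
        rw [pvAj_eq]
        exact pvA2 S cap i j hi hjn hij' hlen (S.getD i []) (fun x hx => hx) _
      rw [hstate, ih hrest]
      have hlen' : ¬ (S[i]?.getD ([] : List Int)).length = 1 := by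
        rw [← List.getD_eq_getElem?_getD]; exact hlen
      simp [hlen']

theorem pvA5 (S : List (List Int)) (cap : Int) :
    ∀ (I : List Nat), (∀ i ∈ I, i < S.length) →
      (I.foldl (fun (st : List (List Int) × Int) (i : Nat) => pvAi S cap st (i : Int)) (S, (S.length : Int)))
        = (match I.findSome? (pvFind S cap) with
           | some b => (b, (S.length : Int) - 1)
           | none => (S, (S.length : Int))) := by
  intro I
  induction I with
  | nil => intro _; rfl
  | cons i I ih =>
    intro hI
    have hin : i < S.length := hI i (by simp)
    have hrest : ∀ i' ∈ I, i' < S.length := fun i' hi' => hI i' (List.mem_cons_of_mem _ hi')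
    rw [List.foldl_cons, List.findSome?_cons]
    have hAi : pvAi S cap (S, (S.length : Int)) ((i : Nat) : Int)
        = (match pvFind S cap i with
           | some b => (b, (S.length : Int) - 1)
           | none => (S, (S.length : Int))) := by
      unfold pvAi
      have hm : ((S.length : Int) - ((i : Int) + 1)).toNat = S.length - (i + 1) := by omega
      have hr : PySem.List.pyRange ((i : Int) + 1) (S.length : Int) 1
          = (List.range' (i + 1) (S.length - (i + 1))).map (fun j : Nat => (j : Int)) := by
        rw [PySem.List.pyRange_one, hm, List.range'_eq_map_range, List.map_map]
        refine List.map_congr_left (fun k _ => ?_)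
        simp
      rw [hr, List.foldl_map]
      rw [pvA4 S cap i hin (List.range' (i + 1) (S.length - (i + 1)))
        (fun j hj => by rw [List.mem_range'_1] at hj; omega)]
      rfl
    cases hfi : pvFind S cap i with
    | some b =>
      rw [hfi] at hAi
      rw [hAi, pvFoldl_fixed _ _ I (fun i' => pvAi_fixed S cap _ ((i' : Nat) : Int))]
    | none =>
      rw [hfi] at hAi
      rw [hAi, ih hrest]

theorem pvFind_length (S : List (List Int)) (cap : Int) (i : Nat) (b : List (List Int))
    (h : pvFind S cap i = some b) (hi : i < S.length) : b.length + 1 = S.length := by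
  unfold pvFind at h
  split at h
  · obtain ⟨j, hjmem, hj⟩ := List.exists_of_findSome?_eq_some h
    split at hj
    · cases hj
      simp only [List.length_eraseIdx, List.length_set]
      rw [if_pos hi]
      omega
    · cases hj
  · cases h

-- ===== VERDICT (by name: the statement is the Claim_ definition above) =====
theorem BImprovement_spec : Claim_equal_BImprovement := by
  unfold Claim_equal_BImprovement
  intro S cap _
  unfold Spec_BImprovement
  rw [pvBalt_eq]
  unfold BImprovement
  dsimp only
  have hr0 : PySem.List.pyRange 0 (S.length : Int) 1 = (List.range S.length).map (fun i : Nat => (i : Int)) := by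
    rw [PySem.List.pyRange_one]
    simp
  rw [hr0, List.foldl_map]
  rw [pvA5 S cap (List.range S.length) (fun i hi => List.mem_range.mp hi)]
  cases hfs : (List.range S.length).findSome? (pvFind S cap) with
  | none => simp
  | some b =>
    obtain ⟨i, hmem, hfi⟩ := List.exists_of_findSome?_eq_some hfs
    have hlen := pvFind_length S cap i b hfi (List.mem_range.mp hmem)
    have hne : b ≠ S := by
      intro hE
      rw [hE] at hlen
      omega
    simp [hne]
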